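-- pv_equiv track=rewrite | github.com/jfitz/code-stat | basic_examiner.py | extract_lead_keywords
-- ===== SOURCE A (Python) =====
-- def extract_lead_keywords(text, words):
--   new_texts = []
--   new_text = text + ''
--
--   found = True
--
--   while found:
--     found = False
--
--     for word in words:
--       if new_text.startswith(word):
--         new_texts.append(word)
--         # clip out keyword
--         new_text = new_text[len(word):]
--         found = True
--         break
--
--   if len(new_text) > 0:
--     new_texts.append(new_text)
--
--   return new_texts
-- ===== SOURCE B (Python) =====
-- def extract_lead_keywords(text, words):
--   # index words once by their first position; then repeatedly look up each
--   # prefix of the text (by length) in that index and strip the match whose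
--   # first position in the word list is smallest
--   first_index = {}
--   for i, w in enumerate(words):
--     if w not in first_index:
--       first_index[w] = i
--
--   max_len = 0
--   for w in words:
--     max_len = max(max_len, len(w))
--
--   new_texts = []
--   while True:
--     best = None
--     for L in range(1, min(max_len, len(text)) + 1):
--       i = first_index.get(text[:L])
--       if i is not None and (best is None or i < best[0]):
--         best = (i, L)
--     if best is None:
--       break
--     L = best[1]
--     new_texts.append(text[:L])
--     text = text[L:]
--
--   if len(text) > 0:
--     new_texts.append(text)
--
--   return new_texts
-- ===== Notes on version B (the rewrite author's own statement) =====
-- stated objective: faster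
-- what changed: Instead of rescanning the whole word list with startswith on every pass, B builds a word->first-position index once and at each step looks up the text's prefixes by length (up to the longest word), stripping the candidate with the smallest position, so each step costs O(max_word_len) lookups instead of O(sum of word lengths) prefix tests.
-- outside the precondition, e.g. on extract_lead_keywords('ab', ['', 'ab']): A does not finish within the time limit, B returns ['ab']
import Mathlib
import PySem

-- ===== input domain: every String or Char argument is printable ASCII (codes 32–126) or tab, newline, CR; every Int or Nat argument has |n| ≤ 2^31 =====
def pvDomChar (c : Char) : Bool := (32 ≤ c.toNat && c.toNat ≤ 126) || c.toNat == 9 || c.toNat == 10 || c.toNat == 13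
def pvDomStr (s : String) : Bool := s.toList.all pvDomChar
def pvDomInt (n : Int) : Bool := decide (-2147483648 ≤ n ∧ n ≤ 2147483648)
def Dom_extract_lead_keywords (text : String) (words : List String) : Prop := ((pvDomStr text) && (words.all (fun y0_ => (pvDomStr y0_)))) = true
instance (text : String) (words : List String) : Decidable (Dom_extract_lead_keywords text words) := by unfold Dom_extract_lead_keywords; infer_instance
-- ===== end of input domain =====

-- B replaces A's repeated scan of the whole word list (each pass re-testing every
-- word as a prefix) by a one-time first-position index of the words, looking up the
-- prefixes of the text by length; objective: faster inner step when the word list is long.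

-- ===== PORT A =====
-- A's inner `for word in words: if new_text.startswith(word): … break`
def pvFindA (t : List Char) : List String → Option String
  | [] => none
  | w :: ws => if PySem.Chars.startswith t w.toList then some w else pvFindA t ws

-- A's `while found:` loop; fuel (length+1) is only a totality guard — when no word
-- is empty every matched word strips at least one character, so fuel never runs out.
-- `new_text[len(word):]` is `List.drop` (PySem.List.slice_from_natCast, bound ≥ 0).
def pvLoopA (words : List String) : Nat → List Char → List String → List String × List Char
  | 0, t, acc => (acc, t)
  | Nat.succ n, t, acc =>
    match pvFindA t words with
    | none => (acc, t)
    | some w => pvLoopA words n (t.drop w.toList.length) (acc ++ [w])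

def extract_lead_keywords (text : String) (words : List String) : List String :=
  let t := text.toList
  let r := pvLoopA words (t.length + 1) t []
  if r.2.length > 0 then r.1 ++ [String.ofList r.2] else r.1

-- ===== PORT B =====
-- `if w not in first_index: first_index[w] = i`
def pvFirstIndexStep (d : PySem.Dict String Int) (p : Int × String) : PySem.Dict String Int :=
  if d.contains p.2 then d else d.insert p.2 p.1

def pvFirstIndex (words : List String) : PySem.Dict String Int :=
  (PySem.List.enumerate words).foldl pvFirstIndexStep PySem.Dict.empty

-- `max_len = max(max_len, len(w))` over the words
def pvMaxLen (words : List String) : Nat :=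
  words.foldl (fun m w => max m w.toList.length) 0

-- loop body of `for L in range(1, …)`; `text[:L]` with L ≥ 1 is `take` (PySem.List.slice_to)
def pvBestStep (d : PySem.Dict String Int) (t : List Char) (best : Option (Int × Int)) (L : Int) :
    Option (Int × Int) :=
  match d.get? (String.ofList (t.take L.toNat)) with
  | none => best
  | some i =>
    match best with
    | none => some (i, L)
    | some (bi, _) => if i < bi then some (i, L) else best

-- `best` after the `for L in range(1, min(max_len, len(text)) + 1)` scan
def pvBest (d : PySem.Dict String Int) (K : Nat) (t : List Char) : Option (Int × Int) :=
  (PySem.List.pyRange 1 ((min K t.length : Nat) + 1) 1).foldl (pvBestStep d t) none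

-- B's `while True:` loop; same totality-guard fuel as in A's port
def pvLoopB (d : PySem.Dict String Int) (K : Nat) :
    Nat → List Char → List String → List String × List Char
  | 0, t, acc => (acc, t)
  | Nat.succ n, t, acc =>
    match pvBest d K t with
    | none => (acc, t)
    | some b => pvLoopB d K n (t.drop b.2.toNat) (acc ++ [String.ofList (t.take b.2.toNat)])

def extract_lead_keywords_alt (text : String) (words : List String) : List String :=
  let d := pvFirstIndex words
  let K := pvMaxLen words
  let t := text.toList
  let r := pvLoopB d K (t.length + 1) t []
  if r.2.length > 0 then r.1 ++ [String.ofList r.2] else r.1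

-- ===== PRECONDITION & SPEC =====
-- Pre_ excludes word lists containing the empty string: there A's `startswith`
-- always matches '' and the while-loop never terminates (A returns on nothing else).
def Pre_extract_lead_keywords (text : String) (words : List String) : Prop :=
  "" ∉ words
instance (text : String) (words : List String) : Decidable (Pre_extract_lead_keywords text words) := by
  unfold Pre_extract_lead_keywords; infer_instance

def pvWitness_extract_lead_keywords : String × List String := ("ifabc!", ["if", "ab"])

def Spec_extract_lead_keywords (text : String) (words : List String) (out : List String) : Prop :=
  out = extract_lead_keywords_alt text words
instance (text : String) (words : List String) (out : List String) : Decidable (Spec_extract_lead_keywords text words out) := by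
  unfold Spec_extract_lead_keywords; infer_instance

-- ===== CLAIM (what is proved, stated in full; the proofs are below) =====
def Claim_equal_extract_lead_keywords : Prop := ∀ (text : String) (words : List String), Dom_extract_lead_keywords text words → Pre_extract_lead_keywords text words → Spec_extract_lead_keywords text words (extract_lead_keywords text words)

-- ===== LEMMAS AND PROOFS =====

theorem pv_get?_firstIndex_aux (w : String) :
    ∀ (ws : List String) (s : Int) (d0 : PySem.Dict String Int),
    ((PySem.List.enumerate ws s).foldl pvFirstIndexStep d0).get? w =
      if d0.contains w then d0.get? w
      else (PySem.List.index? ws w).map (fun n => s + (n : Int)) := by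
  intro ws
  induction ws with
  | nil =>
    intro s d0
    simp [PySem.List.enumerate_nil, PySem.List.index?]
    intro h
    rw [PySem.Dict.get?_eq_none_iff_contains]
    simp [h]
  | cons x xs ih =>
    intro s d0
    rw [PySem.List.enumerate_cons]
    simp only [List.foldl_cons]
    rw [ih]
    by_cases hwx : x = w
    · subst hwx
      rw [PySem.List.index?_cons_self]
      by_cases hc : d0.contains x
      · simp [pvFirstIndexStep, hc]
      · simp [pvFirstIndexStep, hc, PySem.Dict.contains_insert_self, PySem.Dict.get?_insert_self]
    · rw [PySem.List.index?_cons_of_ne _ hwx]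
      have hcon : (pvFirstIndexStep d0 (s, x)).contains w = d0.contains w := by
        unfold pvFirstIndexStep
        split
        · rfl
        · simp [PySem.Dict.contains_insert, hwx]
          intro h; exact absurd h.symm hwx
      have hget : (pvFirstIndexStep d0 (s, x)).get? w = d0.get? w := by
        unfold pvFirstIndexStep
        split
        · rfl
        · exact PySem.Dict.get?_insert_of_ne _ _ (fun h => hwx h.symm)
      rw [hcon, hget]
      by_cases hc : d0.contains w
      · simp [hc]
      · simp only [hc, if_false, Option.map_map]
        cases PySem.List.index? xs w <;> simp <;> ring

theorem pv_get?_firstIndex (words : List String) (w : String) :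
    (pvFirstIndex words).get? w = (PySem.List.index? words w).map (fun n => (n : Int)) := by
  unfold pvFirstIndex
  rw [pv_get?_firstIndex_aux]
  simp

theorem pv_maxLen_init (ws : List String) :
    ∀ (init : Nat), init ≤ ws.foldl (fun m w => max m w.toList.length) init := by
  induction ws with
  | nil => intro init; simp
  | cons x xs ih =>
    intro init
    simp only [List.foldl_cons]
    exact le_trans (le_max_left _ _) (ih _)

theorem pv_mem_le_maxLen' {w : String} {ws : List String} (h : w ∈ ws) :
    ∀ init, w.toList.length ≤ ws.foldl (fun m w => max m w.toList.length) init := by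
  induction ws with
  | nil => cases h
  | cons x xs ih =>
    intro init
    rcases List.mem_cons.mp h with h | h
    · subst h
      simp only [List.foldl_cons]
      exact le_trans (le_max_right _ _) (pv_maxLen_init _ _)
    · exact ih h _

theorem pv_mem_le_maxLen {w : String} {words : List String} (h : w ∈ words) :
    w.toList.length ≤ pvMaxLen words :=
  pv_mem_le_maxLen' h 0

theorem pv_findA_none {t : List Char} {words : List String} :
    pvFindA t words = none ↔ ∀ w ∈ words, ¬ (w.toList <+: t) := by
  induction words with
  | nil => simp [pvFindA]
  | cons x xs ih =>
    simp only [pvFindA]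
    by_cases hx : PySem.Chars.startswith t x.toList
    · rw [if_pos hx]
      constructor
      · intro h; cases h
      · intro h
        exact absurd ((PySem.Chars.startswith_iff _ _).mp hx) (h x (List.mem_cons_self ..))
    · rw [if_neg hx, ih]
      constructor
      · intro h w hw
        rcases List.mem_cons.mp hw with h1 | h1
        · subst h1
          intro hp
          exact hx ((PySem.Chars.startswith_iff _ _).mpr hp)
        · exact h w h1
      · intro h w hw; exact h w (List.mem_cons_of_mem _ hw)

theorem pv_findA_some {t : List Char} {words : List String} {w : String} :
    pvFindA t words = some w →
    w ∈ words ∧ w.toList <+: t ∧ ∃ k, PySem.List.index? words w = some k ∧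
      ∀ w' ∈ words, w'.toList <+: t → ∀ k', PySem.List.index? words w' = some k' →
        k ≤ k' ∧ (w' ≠ w → k < k') := by
  induction words with
  | nil => intro h; cases h
  | cons x xs ih =>
    intro h
    simp only [pvFindA] at h
    by_cases hx : PySem.Chars.startswith t x.toList
    · rw [if_pos hx] at h
      cases h
      refine ⟨List.mem_cons_self .., (PySem.Chars.startswith_iff _ _).mp hx, 0,
        PySem.List.index?_cons_self _ _, ?_⟩
      intro w' _ _ k' hk'
      by_cases hw' : w' = w
      · subst hw'
        rw [PySem.List.index?_cons_self] at hk'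
        cases hk'
        exact ⟨Nat.le_refl 0, fun hne => absurd rfl hne⟩
      · rw [PySem.List.index?_cons_of_ne _ (fun h => hw' h.symm)] at hk'
        rcases Option.map_eq_some_iff.mp hk' with ⟨n, _, hn⟩
        omega
    · rw [if_neg hx] at h
      obtain ⟨hmem, hpre, k, hk, hmin⟩ := ih h
      have hwx : w ≠ x := by
        rintro rfl
        exact hx ((PySem.Chars.startswith_iff _ _).mpr hpre)
      refine ⟨List.mem_cons_of_mem _ hmem, hpre, k + 1, ?_, ?_⟩
      · rw [PySem.List.index?_cons_of_ne _ (fun h => hwx h.symm), hk]; rfl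
      · intro w' hw' hp' k' hk'
        have hw'x : w' ≠ x := by
          rintro rfl
          exact hx ((PySem.Chars.startswith_iff _ _).mpr hp')
        rw [PySem.List.index?_cons_of_ne _ (fun h => hw'x h.symm)] at hk'
        rcases Option.map_eq_some_iff.mp hk' with ⟨n, hn, rfl⟩
        rcases List.mem_cons.mp hw' with h1 | h1
        · exact absurd h1 hw'x
        · obtain ⟨h2, h3⟩ := hmin w' h1 hp' n hn
          exact ⟨by omega, fun hne => by have := h3 hne; omega⟩

theorem pv_fold_none (d : PySem.Dict String Int) (t : List Char) :
    ∀ (Ls : List Int), (∀ L ∈ Ls, d.get? (String.ofList (t.take L.toNat)) = none) →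
    Ls.foldl (pvBestStep d t) none = none := by
  intro Ls
  induction Ls with
  | nil => intro _; rfl
  | cons L Ls ih =>
    intro h
    simp only [List.foldl_cons]
    have h1 := h L (List.mem_cons_self ..)
    have : pvBestStep d t none L = none := by unfold pvBestStep; rw [h1]
    rw [this]
    exact ih (fun L' hL' => h L' (List.mem_cons_of_mem _ hL'))

theorem pv_fold_keep (d : PySem.Dict String Int) (t : List Char) (iw Lw : Int) :
    ∀ (Ls : List Int),
    (∀ L ∈ Ls, ∀ i, d.get? (String.ofList (t.take L.toNat)) = some i → iw ≤ i) →
    Ls.foldl (pvBestStep d t) (some (iw, Lw)) = some (iw, Lw) := by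
  intro Ls
  induction Ls with
  | nil => intro _; rfl
  | cons L Ls ih =>
    intro h
    simp only [List.foldl_cons]
    have hstep : pvBestStep d t (some (iw, Lw)) L = some (iw, Lw) := by
      unfold pvBestStep
      cases hg : d.get? (String.ofList (t.take L.toNat)) with
      | none => rfl
      | some i =>
        have := h L (List.mem_cons_self ..) i hg
        simp only
        rw [if_neg (by omega)]
    rw [hstep]
    exact ih (fun L' hL' => h L' (List.mem_cons_of_mem _ hL'))

theorem pv_fold_pre (d : PySem.Dict String Int) (t : List Char) (iw : Int) :
    ∀ (Ls : List Int) (acc : Option (Int × Int)),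
    (∀ L ∈ Ls, ∀ i, d.get? (String.ofList (t.take L.toNat)) = some i → iw < i) →
    (acc = none ∨ ∃ i L, acc = some (i, L) ∧ iw < i) →
    (Ls.foldl (pvBestStep d t) acc = none ∨
      ∃ i L, Ls.foldl (pvBestStep d t) acc = some (i, L) ∧ iw < i) := by
  intro Ls
  induction Ls with
  | nil => intro acc _ hacc; simpa using hacc
  | cons L Ls ih =>
    intro acc h hacc
    simp only [List.foldl_cons]
    apply ih _ (fun L' hL' => h L' (List.mem_cons_of_mem _ hL'))
    cases hg : d.get? (String.ofList (t.take L.toNat)) with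
    | none =>
      have : pvBestStep d t acc L = acc := by unfold pvBestStep; rw [hg]
      rw [this]; exact hacc
    | some i =>
      have hlt := h L (List.mem_cons_self ..) i hg
      rcases hacc with rfl | ⟨bi, bL, rfl, hbi⟩
      · right
        exact ⟨i, L, by unfold pvBestStep; rw [hg], hlt⟩
      · right
        unfold pvBestStep
        rw [hg]
        simp only
        by_cases hib : i < bi
        · rw [if_pos hib]; exact ⟨i, L, rfl, hlt⟩
        · rw [if_neg hib]; exact ⟨bi, bL, rfl, hbi⟩

theorem pv_get?_firstIndex_some {words : List String} {w : String} {i : Int} :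
    (pvFirstIndex words).get? w = some i ↔
      ∃ n, PySem.List.index? words w = some n ∧ i = (n : Int) := by
  rw [pv_get?_firstIndex]
  cases h : PySem.List.index? words w with
  | none => simp
  | some n => simp [eq_comm]

theorem pv_best_none {t : List Char} {words : List String}
    (h : ∀ w ∈ words, ¬ (w.toList <+: t)) :
    pvBest (pvFirstIndex words) (pvMaxLen words) t = none := by
  unfold pvBest
  apply pv_fold_none
  intro L _
  cases hg : (pvFirstIndex words).get? (String.ofList (t.take L.toNat)) with
  | none => rfl
  | some i =>
    exfalso
    rcases pv_get?_firstIndex_some.mp hg with ⟨n, hn, _⟩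
    have hmem : String.ofList (t.take L.toNat) ∈ words :=
      (PySem.List.index?_isSome_iff _ _).mp (by rw [hn]; rfl)
    have hq := h _ hmem
    rw [String.toList_ofList] at hq
    exact hq (List.take_prefix _ _)

theorem pv_best_some {t : List Char} {words : List String} {w : String}
    (h0 : "" ∉ words) (h : pvFindA t words = some w) :
    ∃ k : Nat, PySem.List.index? words w = some k ∧
      pvBest (pvFirstIndex words) (pvMaxLen words) t = some ((k : Int), (w.toList.length : Int)) := by
  obtain ⟨hmem, hpre, k, hk, hmin⟩ := pv_findA_some h
  refine ⟨k, hk, ?_⟩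
  have hw0 : w.toList ≠ [] := by
    intro hnil
    apply h0
    have he := congrArg String.ofList hnil
    rw [String.ofList_toList] at he
    rwa [he] at hmem
  have h1 : 1 ≤ w.toList.length := Nat.pos_of_ne_zero (by simpa using hw0)
  have h2 : w.toList.length ≤ t.length := hpre.length_le
  have h3 : w.toList.length ≤ pvMaxLen words := pv_mem_le_maxLen hmem
  have hM : w.toList.length ≤ min (pvMaxLen words) t.length := le_min h3 h2
  have hC : ∀ L : Int, 1 ≤ L → L < ((min (pvMaxLen words) t.length : Nat) : Int) + 1 →
      ∀ i, (pvFirstIndex words).get? (String.ofList (t.take L.toNat)) = some i →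
      ((k : Int) ≤ i ∧ (L ≠ (w.toList.length : Int) → (k : Int) < i)) := by
    intro L hL1 hL2 i hg
    rcases pv_get?_firstIndex_some.mp hg with ⟨n, hn, rfl⟩
    have hmem' : String.ofList (t.take L.toNat) ∈ words :=
      (PySem.List.index?_isSome_iff _ _).mp (by rw [hn]; rfl)
    have hpre' : (String.ofList (t.take L.toNat)).toList <+: t := by
      rw [String.toList_ofList]; exact List.take_prefix _ _
    obtain ⟨ha, hb⟩ := hmin _ hmem' hpre' n hn
    refine ⟨by exact_mod_cast ha, ?_⟩
    intro hLne
    have hwne : String.ofList (t.take L.toNat) ≠ w := by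
      intro he
      apply hLne
      have hlen1 : L.toNat ≤ t.length := by omega
      have hlen : (t.take L.toNat).length = L.toNat := by
        rw [List.length_take]; omega
      have : w.toList = t.take L.toNat := by rw [← he, String.toList_ofList]
      have : w.toList.length = L.toNat := by rw [this, hlen]
      omega
    exact_mod_cast hb hwne
  have hsplit : PySem.List.pyRange 1 (((min (pvMaxLen words) t.length : Nat) : Int) + 1) =
      PySem.List.pyRange 1 (w.toList.length : Int) ++
        (w.toList.length : Int) ::
          PySem.List.pyRange ((w.toList.length : Int) + 1) (((min (pvMaxLen words) t.length : Nat) : Int) + 1) := by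
    rw [PySem.List.pyRange_one_append 1 (w.toList.length : Int) _ (by exact_mod_cast h1)
      (by push_cast; omega)]
    congr 1
    exact PySem.List.pyRange_one_cons (by push_cast; omega)
  have hgLw : (pvFirstIndex words).get? (String.ofList (t.take ((w.toList.length : Int)).toNat)) =
      some (k : Int) := by
    rw [Int.toNat_natCast]
    have htake : t.take w.toList.length = w.toList := (List.prefix_iff_eq_take.mp hpre).symm
    rw [htake, String.ofList_toList]
    exact pv_get?_firstIndex_some.mpr ⟨k, hk, rfl⟩
  unfold pvBest
  rw [hsplit, List.foldl_append]
  have hfirst := pv_fold_pre (pvFirstIndex words) t (k : Int)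
    (PySem.List.pyRange 1 (w.toList.length : Int)) none
    (by
      intro L hL i hg
      rw [PySem.List.mem_pyRange_one] at hL
      exact (hC L hL.1 (by push_cast; omega) i hg).2 (by omega))
    (Or.inl rfl)
  simp only [List.foldl_cons]
  have hstep : pvBestStep (pvFirstIndex words) t
      ((PySem.List.pyRange 1 (w.toList.length : Int)).foldl (pvBestStep (pvFirstIndex words) t) none)
      (w.toList.length : Int) = some ((k : Int), (w.toList.length : Int)) := by
    rcases hfirst with hnone | ⟨i, L, heq, hlt⟩
    · rw [hnone]
      unfold pvBestStep
      rw [hgLw]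
    · rw [heq]
      unfold pvBestStep
      rw [hgLw]
      simp only
      rw [if_pos hlt]
  rw [hstep]
  apply pv_fold_keep
  intro L hL i hg
  rw [PySem.List.mem_pyRange_one] at hL
  exact (hC L (by omega) (by omega) i hg).1

theorem pv_loop_eq {words : List String} (h0 : "" ∉ words) :
    ∀ (n : Nat) (t : List Char) (acc : List String),
    pvLoopA words n t acc = pvLoopB (pvFirstIndex words) (pvMaxLen words) n t acc := by
  intro n
  induction n with
  | zero => intro t acc; rfl
  | succ n ih =>
    intro t acc
    simp only [pvLoopA, pvLoopB]
    cases hf : pvFindA t words with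
    | none =>
      rw [pv_best_none (pv_findA_none.mp hf)]
    | some w =>
      obtain ⟨k, hk, hb⟩ := pv_best_some h0 hf
      rw [hb]
      simp only [Int.toNat_natCast]
      have hpre := (pv_findA_some hf).2.1
      have htake : t.take w.toList.length = w.toList := (List.prefix_iff_eq_take.mp hpre).symm
      rw [htake, String.ofList_toList]
      exact ih _ _

-- ===== VERDICT (by name: the statement is the Claim_ definition above) =====
theorem extract_lead_keywords_spec : Claim_equal_extract_lead_keywords := by
  intro text words _ hpre
  unfold Spec_extract_lead_keywords
  simp only [extract_lead_keywords, extract_lead_keywords_alt, pv_loop_eq hpre]
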